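-- pv_equiv track=rewrite | github.com/kdExile/learningPy | Vampire Number.py | digitCheck
-- ===== SOURCE A (Python) =====
-- def digitCheck(i,j,n):
--     n=str(n)
--     i=str(i)
--     j=str(j)
--     i+=(j)
--
--     if len(i)!=len(n):
--         return False
--     for k in range(len(n)):
--         if  n.count(i[k])!=i.count(i[k]) :
--             return False
--     return True
-- ===== SOURCE B (Python) =====
-- def digitCheck(i, j, n):
--     return sorted(str(i) + str(j)) == sorted(str(n))
-- ===== Notes on version B (the rewrite author's own statement) =====
-- stated objective: simpler
-- what changed: Replaced the length guard plus per-position .count scanning loop with a single sorted-digit-string comparison (sorted(str(i)+str(j)) == sorted(str(n))).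
import Mathlib
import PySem

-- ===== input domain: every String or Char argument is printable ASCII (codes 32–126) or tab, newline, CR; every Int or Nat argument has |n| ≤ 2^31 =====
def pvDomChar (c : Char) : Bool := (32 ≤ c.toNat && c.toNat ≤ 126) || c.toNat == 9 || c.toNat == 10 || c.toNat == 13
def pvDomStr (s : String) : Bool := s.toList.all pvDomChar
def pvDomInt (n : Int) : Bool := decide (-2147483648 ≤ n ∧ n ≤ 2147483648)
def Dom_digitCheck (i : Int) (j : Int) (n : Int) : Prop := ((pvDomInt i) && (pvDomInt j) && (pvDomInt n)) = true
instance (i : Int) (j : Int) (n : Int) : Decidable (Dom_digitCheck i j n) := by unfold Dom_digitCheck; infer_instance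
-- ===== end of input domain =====

-- B replaces the length guard and the per-position count-scanning loop with a single
-- sorted-digit-list comparison; objective: simpler.


-- ===== PORT A =====
-- the 'for k in range(len(n)): if n.count(i[k]) != i.count(i[k]): return False' loop
-- (by the guard, len(i) = len(n), so i[k] is always in range; the none branch is unreachable)
def digitCheckLoop (nL iL : List Char) : List Nat → Bool
  | [] => true
  | k :: ks =>
    match PySem.List.pyGet? iL (k : Int) with
    | none => false
    | some c => if nL.count c ≠ iL.count c then false else digitCheckLoop nL iL ks

def digitCheck (i : Int) (j : Int) (n : Int) : Bool :=
  let nL := PySem.Int.toChars n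
  let iL := PySem.Int.toChars i ++ PySem.Int.toChars j   -- i = str(i); i += j
  if iL.length ≠ nL.length then false
  else digitCheckLoop nL iL (List.range nL.length)

-- ===== PORT B =====
-- sorted(str(i) + str(j)) == sorted(str(n))
def digitCheck_alt (i : Int) (j : Int) (n : Int) : Bool :=
  PySem.List.sorted (PySem.Int.toChars i ++ PySem.Int.toChars j) (fun x => x) false
    == PySem.List.sorted (PySem.Int.toChars n) (fun x => x) false

-- ===== PRECONDITION & SPEC =====
def Spec_digitCheck (i : Int) (j : Int) (n : Int) (out : Bool) : Prop := out = digitCheck_alt i j n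
instance (i : Int) (j : Int) (n : Int) (out : Bool) : Decidable (Spec_digitCheck i j n out) := by unfold Spec_digitCheck; infer_instance

-- ===== CLAIM (what is proved, stated in full; the proofs are below) =====
def Claim_equal_digitCheck : Prop := ∀ (i : Int) (j : Int) (n : Int), Dom_digitCheck i j n → Spec_digitCheck i j n (digitCheck i j n)

-- ===== LEMMAS AND PROOFS =====

-- the loop succeeds iff every indexed character has matching counts in nL and iL
theorem digitCheckLoop_eq_true_iff (nL iL : List Char) (ks : List Nat)
    (hks : ∀ k ∈ ks, k < iL.length) :
    digitCheckLoop nL iL ks = true ↔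
      ∀ k ∈ ks, ∀ c, iL[k]? = some c → nL.count c = iL.count c := by
  induction ks with
  | nil => simp [digitCheckLoop]
  | cons k ks ih =>
    have hk : k < iL.length := hks k (by simp)
    have hget : PySem.List.pyGet? iL (k : Int) = iL[k]? := PySem.List.pyGet?_natCast ..
    have hsome : iL[k]? = some iL[k] := List.getElem?_eq_getElem hk
    rw [digitCheckLoop, hget, hsome]
    by_cases hc : nL.count iL[k] = iL.count iL[k]
    · simp only [hc, ne_eq, not_true_eq_false, if_false]
      rw [ih (fun x hx => hks x (by simp [hx]))]
      constructor
      · intro h x hx c hcx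
        rcases List.mem_cons.mp hx with rfl | hx
        · rw [hsome] at hcx; cases hcx; exact hc
        · exact h x hx c hcx
      · intro h x hx c hcx
        exact h x (List.mem_cons_of_mem _ hx) c hcx
    · simp only [ne_eq, hc, not_false_eq_true, if_true]
      constructor
      · intro h; cases h
      · intro h
        exact absurd (h k (by simp) iL[k] hsome) hc

-- counts agreeing on iL's members plus equal lengths force a permutation
theorem perm_of_length_eq_of_count (iL nL : List Char)
    (hlen : iL.length = nL.length)
    (hcnt : ∀ c ∈ iL, nL.count c = iL.count c) : iL.Perm nL := by
  rw [← Multiset.coe_eq_coe]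
  have hle : (iL : Multiset Char) ≤ (nL : Multiset Char) := by
    rw [Multiset.le_iff_count]
    intro c
    by_cases hc : c ∈ iL
    · simpa [Multiset.coe_count] using (hcnt c hc).ge
    · simp [Multiset.coe_count, List.count_eq_zero_of_not_mem hc]
  exact Multiset.eq_of_le_of_card_le hle (by simpa using hlen.ge)

theorem digitCheck_eq_alt (i j n : Int) : digitCheck i j n = digitCheck_alt i j n := by
  unfold digitCheck digitCheck_alt
  set nL := PySem.Int.toChars n with hnL
  set iL := PySem.Int.toChars i ++ PySem.Int.toChars j with hiL
  simp only []
  have hsorted : (PySem.List.sorted iL (fun x => x) false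
      == PySem.List.sorted nL (fun x => x) false) = decide (iL.Perm nL) := by
    by_cases hp : iL.Perm nL
    · rw [(PySem.List.sorted_id_eq_sorted_id_iff_perm iL nL).mpr hp]
      simp [hp]
    · have hne : (PySem.List.sorted iL (fun x => x) false)
          ≠ PySem.List.sorted nL (fun x => x) false :=
        fun h => hp ((PySem.List.sorted_id_eq_sorted_id_iff_perm iL nL).mp h)
      simp [hne, hp]
  rw [hsorted]
  by_cases hlen : iL.length = nL.length
  · simp only [hlen, ne_eq, not_true_eq_false, if_false]
    by_cases hp : iL.Perm nL
    · rw [(digitCheckLoop_eq_true_iff nL iL (List.range nL.length)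
        (fun k hk => by rw [hlen]; exact List.mem_range.mp hk)).mpr, decide_eq_true hp]
      intro k hk c hc
      exact (hp.count_eq c).symm
    · simp only [hp, decide_false]
      rw [← Bool.not_eq_true]
      rw [digitCheckLoop_eq_true_iff nL iL (List.range nL.length)
        (fun k hk => by rw [hlen]; exact List.mem_range.mp hk)]
      intro h
      apply hp
      apply perm_of_length_eq_of_count iL nL hlen
      intro c hc
      obtain ⟨k, hk, hck⟩ := List.mem_iff_getElem.mp hc
      exact h k (List.mem_range.mpr (by omega)) c (by rw [List.getElem?_eq_getElem hk, hck])
  · simp only [ne_eq, hlen, not_false_eq_true, if_true]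
    have : ¬ iL.Perm nL := fun hp => hlen hp.length_eq
    simp [this]

-- ===== VERDICT (by name: the statement is the Claim_ definition above) =====
theorem digitCheck_spec : Claim_equal_digitCheck := by
  intro i j n _
  unfold Spec_digitCheck
  exact digitCheck_eq_alt i j n
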